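-- pv_equiv track=rewrite | github.com/longytravel/bank-communication-system | src/communication_processing/customer_plans_ui.py | filter_customers
-- ===== SOURCE A (Python) =====
-- from typing import List, Dict, Any, Optional
--
-- def filter_customers(customer_categories: List[Dict], filter_option: str) -> List[Dict]:
--     """Filter customers based on selection."""
--     if filter_option == "First 20":
--         return customer_categories[:20]
--     elif filter_option == "First 10":
--         return customer_categories[:10]
--     elif filter_option == "First 5":
--         return customer_categories[:5]
--     elif filter_option == "Digital-first only":
--         digital = [c for c in customer_categories if c.get('category') == 'Digital-first self-serve']
--         return digital[:20]  # Max 20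
--     elif filter_option == "High-value only":
--         high_value = []
--         for customer in customer_categories:
--             if customer.get('upsell_eligible', False):
--                 high_value.append(customer)
--         return high_value[:20]  # Max 20
--     else:
--         return customer_categories[:20]
-- ===== SOURCE B (Python) =====
-- _FILTERS = {
--     "First 20": (None, 20),
--     "First 10": (None, 10),
--     "First 5": (None, 5),
--     "Digital-first only": (lambda c: c.get('category') == 'Digital-first self-serve', 20),
--     "High-value only": (lambda c: bool(c.get('upsell_eligible', False)), 20),
-- }
--
-- def filter_customers(customer_categories, filter_option):
--     pred, limit = _FILTERS.get(filter_option, (None, 20))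
--     result = [c for c in customer_categories if pred is None or pred(c)]
--     return result[:limit]
-- ===== Notes on version B (the rewrite author's own statement) =====
-- stated objective: simpler
-- what changed: Replaced the five-way if/elif chain (with two differently-shaped filter paths: a comprehension and an append loop) by a single table lookup giving a (predicate, limit) pair followed by one unified filter-and-cap pass.
import Mathlib
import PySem

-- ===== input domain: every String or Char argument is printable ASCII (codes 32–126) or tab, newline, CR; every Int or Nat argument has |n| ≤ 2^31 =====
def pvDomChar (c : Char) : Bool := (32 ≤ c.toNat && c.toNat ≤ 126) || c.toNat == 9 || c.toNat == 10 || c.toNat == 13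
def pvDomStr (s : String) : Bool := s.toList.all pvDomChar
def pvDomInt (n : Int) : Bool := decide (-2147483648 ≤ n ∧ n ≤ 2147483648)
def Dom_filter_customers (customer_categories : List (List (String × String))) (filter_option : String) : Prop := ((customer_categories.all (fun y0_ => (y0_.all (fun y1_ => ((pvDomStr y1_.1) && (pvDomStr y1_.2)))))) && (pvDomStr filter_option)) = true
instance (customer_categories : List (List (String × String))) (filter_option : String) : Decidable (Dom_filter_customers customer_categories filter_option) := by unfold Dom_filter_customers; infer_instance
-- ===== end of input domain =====

-- B replaces A's five-way if/elif chain (two differently-shaped filter paths) by one table lookup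
-- of a (predicate, limit) pair plus a single unified filter-and-cap pass (objective: simpler).


-- ===== PORT A =====
-- dict values are strings here, so Python's truthiness of c.get('upsell_eligible', False)
-- is: key present and value a nonempty string (ported exactly as getD "" ≠ "").
def filter_customers (customer_categories : List (List (String × String))) (filter_option : String) : List (List (String × String)) :=
  if filter_option == "First 20" then PySem.List.slice customer_categories none (some 20)
  else if filter_option == "First 10" then PySem.List.slice customer_categories none (some 10)
  else if filter_option == "First 5" then PySem.List.slice customer_categories none (some 5)
  else if filter_option == "Digital-first only" then
    let digital := customer_categories.filter (fun c => (PySem.Dict.mk c).get? "category" == some "Digital-first self-serve")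
    PySem.List.slice digital none (some 20)
  else if filter_option == "High-value only" then
    let high_value := customer_categories.foldl (fun acc c => if !((PySem.Dict.mk c).getD "upsell_eligible" "" == "") then acc ++ [c] else acc) []
    PySem.List.slice high_value none (some 20)
  else PySem.List.slice customer_categories none (some 20)

-- ===== PORT B =====
def pvFilterTable : PySem.Dict String ((Option (List (String × String) → Bool)) × Int) :=
  PySem.Dict.ofList
    [("First 20", (none, 20)),
     ("First 10", (none, 10)),
     ("First 5", (none, 5)),
     ("Digital-first only", (some (fun c => (PySem.Dict.mk c).get? "category" == some "Digital-first self-serve"), 20)),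
     ("High-value only", (some (fun c => !((PySem.Dict.mk c).getD "upsell_eligible" "" == "")), 20))]

def filter_customers_alt (customer_categories : List (List (String × String))) (filter_option : String) : List (List (String × String)) :=
  let pl := pvFilterTable.getD filter_option (none, 20)
  let result := customer_categories.filter (fun c => match pl.1 with | none => true | some p => p c)
  PySem.List.slice result none (some pl.2)

-- ===== PRECONDITION & SPEC =====
def Spec_filter_customers (customer_categories : List (List (String × String))) (filter_option : String) (out : List (List (String × String))) : Prop := out = filter_customers_alt customer_categories filter_option
instance (customer_categories : List (List (String × String))) (filter_option : String) (out : List (List (String × String))) : Decidable (Spec_filter_customers customer_categories filter_option out) := by unfold Spec_filter_customers; infer_instance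

-- ===== CLAIM (what is proved, stated in full; the proofs are below) =====
def Claim_equal_filter_customers : Prop := ∀ (customer_categories : List (List (String × String))) (filter_option : String), Dom_filter_customers customer_categories filter_option → Spec_filter_customers customer_categories filter_option (filter_customers customer_categories filter_option)

-- ===== LEMMAS AND PROOFS =====
-- A's append loop for 'High-value only' (as simp normalises it) is filter.
lemma pv_foldl_hv (l acc : List (List (String × String))) :
    List.foldl (fun acc c => if (PySem.Dict.mk c).getD "upsell_eligible" "" = "" then acc else acc ++ [c]) acc l
      = acc ++ l.filter (fun c => !((PySem.Dict.mk c).getD "upsell_eligible" "" == "")) := by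
  induction l generalizing acc with
  | nil => simp
  | cons x xs ih =>
    by_cases h : (PySem.Dict.mk x).getD "upsell_eligible" "" = "" <;> simp [h, ih]

-- ===== VERDICT (by name: the statement is the Claim_ definition above) =====
theorem filter_customers_spec : Claim_equal_filter_customers := by
  intro ccs fo _
  unfold Spec_filter_customers filter_customers filter_customers_alt
  by_cases h1 : fo = "First 20"
  · simp [h1, pvFilterTable, PySem.Dict.ofList, PySem.Dict.update, PySem.Dict.getD_insert]
  · by_cases h2 : fo = "First 10"
    · simp [h2, pvFilterTable, PySem.Dict.ofList, PySem.Dict.update, PySem.Dict.getD_insert]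
    · by_cases h3 : fo = "First 5"
      · simp [h3, pvFilterTable, PySem.Dict.ofList, PySem.Dict.update, PySem.Dict.getD_insert]
      · by_cases h4 : fo = "Digital-first only"
        · simp [h4, pvFilterTable, PySem.Dict.ofList, PySem.Dict.update, PySem.Dict.getD_insert]
        · by_cases h5 : fo = "High-value only"
          · simp [h5, pvFilterTable, PySem.Dict.ofList, PySem.Dict.update, pv_foldl_hv]
          · simp [h1, h2, h3, h4, h5, pvFilterTable, PySem.Dict.ofList, PySem.Dict.update,
              PySem.Dict.getD_insert, PySem.Dict.getD_empty]
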